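-- pv_equiv track=rewrite | github.com/Vade-20/Linear_Equations_solver | equation_solver.py | right_eq
-- ===== SOURCE A (Python) =====
-- def right_eq(eq):
--     d = ''
--     for i in eq:
--         if i in ['+','-']:
--             d+=f' {i}'
--         elif i=='=':
--             d+=' = '
--         elif i!=' ':
--             d+=i
--     return d
-- ===== SOURCE B (Python) =====
-- def right_eq(eq):
--     s = eq.replace(' ', '')
--     s = s.replace('+', ' +').replace('-', ' -')
--     return s.replace('=', ' = ')
-- ===== Notes on version B (the rewrite author's own statement) =====
-- stated objective: simpler
-- what changed: Replaces the per-character accumulator loop with whole-string replace passes: one pass deletes spaces, one pass per operator kind inserts the surrounding spaces; the passes run in C inside str.replace, a constant-factor speedup.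
import Mathlib
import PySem

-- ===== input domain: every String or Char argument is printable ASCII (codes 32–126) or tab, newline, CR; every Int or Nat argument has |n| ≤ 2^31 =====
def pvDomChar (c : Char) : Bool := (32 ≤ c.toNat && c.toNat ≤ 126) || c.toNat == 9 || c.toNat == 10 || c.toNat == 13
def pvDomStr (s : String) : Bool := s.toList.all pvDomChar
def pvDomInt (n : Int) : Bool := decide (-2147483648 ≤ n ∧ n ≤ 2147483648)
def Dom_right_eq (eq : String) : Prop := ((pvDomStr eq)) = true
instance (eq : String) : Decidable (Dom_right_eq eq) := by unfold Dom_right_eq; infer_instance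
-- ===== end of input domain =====

-- ===== PORT A =====
-- B replaces A's per-character accumulator loop by three whole-string replace passes (objective: simpler).
def right_eq (eq : String) : String :=
  String.ofList (eq.toList.foldl (fun d i =>
    if i = '+' ∨ i = '-' then d ++ [' ', i]
    else if i = '=' then d ++ [' ', '=', ' ']
    else if i ≠ ' ' then d ++ [i]
    else d) [])

-- ===== PORT B =====
def right_eq_alt (eq : String) : String :=
  PySem.Str.replace
    (PySem.Str.replace (PySem.Str.replace (PySem.Str.replace eq " " "") "+" " +") "-" " -")
    "=" " = "

-- ===== PRECONDITION & SPEC =====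
def Spec_right_eq (eq : String) (out : String) : Prop := out = right_eq_alt eq
instance (eq : String) (out : String) : Decidable (Spec_right_eq eq out) := by unfold Spec_right_eq; infer_instance

-- ===== CLAIM (what is proved, stated in full; the proofs are below) =====
def Claim_equal_right_eq : Prop := ∀ (eq : String), Dom_right_eq eq → Spec_right_eq eq (right_eq eq)

-- ===== LEMMAS AND PROOFS =====

-- single-character replace is a per-character flatMap
theorem replace_go_single (o : Char) (new : List Char) :
    ∀ (fuel : Nat) (l acc : List Char), l.length ≤ fuel →
      PySem.Chars.replace.go [o] new fuel l acc
        = acc.reverse ++ l.flatMap (fun c => if c = o then new else [c]) := by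
  intro fuel
  induction fuel with
  | zero =>
    intro l acc h
    have hl : l = [] := List.length_eq_zero_iff.mp (Nat.le_zero.mp h)
    subst hl
    simp [PySem.Chars.replace.go]
  | succ n ih =>
    intro l acc h
    cases l with
    | nil => simp [PySem.Chars.replace.go]
    | cons c t =>
      by_cases hc : c = o
      · have hpre : [o].isPrefixOf (c :: t) = true := by
          simp [List.isPrefixOf, hc]
        rw [PySem.Chars.replace.go, if_pos hpre]
        have := ih t (new.reverse ++ acc) (by simpa using Nat.lt_succ_iff.mp (by simpa using h))
        simp [hc, List.flatMap_cons, this]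
      · have hpre : [o].isPrefixOf (c :: t) = false := by
          simp [List.isPrefixOf]
          exact fun hco => absurd hco.symm hc
        rw [PySem.Chars.replace.go, if_neg (by simp [hpre])]
        have := ih t (c :: acc) (by simpa using Nat.lt_succ_iff.mp (by simpa using h))
        simp [hc, List.flatMap_cons, this]

theorem replace_single (s : List Char) (o : Char) (new : List Char) :
    PySem.Chars.replace s [o] new = s.flatMap (fun c => if c = o then new else [c]) := by
  rw [PySem.Chars.replace]
  simp [replace_go_single o new s.length s [] (le_refl _)]

theorem flatMap_flatMap (l : List Char) (f g : Char → List Char) :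
    (l.flatMap f).flatMap g = l.flatMap (fun c => (f c).flatMap g) := by
  induction l with
  | nil => rfl
  | cons c t ih => simp [List.flatMap_cons, List.flatMap_append, ih]

-- ===== VERDICT (by name: the statement is the Claim_ definition above) =====
theorem right_eq_spec : Claim_equal_right_eq := by
  intro eq _
  unfold Spec_right_eq right_eq right_eq_alt
  apply String.toList_injective
  simp only [PySem.Str.toList_replace, String.toList_ofList]
  have e1 : (" " : String).toList = [' '] := rfl
  have e2 : ("" : String).toList = [] := rfl
  have e3 : ("+" : String).toList = ['+'] := rfl
  have e4 : (" +" : String).toList = [' ', '+'] := rfl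
  have e5 : ("-" : String).toList = ['-'] := rfl
  have e6 : (" -" : String).toList = [' ', '-'] := rfl
  have e7 : ("=" : String).toList = ['='] := rfl
  have e8 : (" = " : String).toList = [' ', '=', ' '] := rfl
  rw [e1, e2, e3, e4, e5, e6, e7, e8]
  have hfun : (fun (d : List Char) (i : Char) =>
      if i = '+' ∨ i = '-' then d ++ [' ', i]
      else if i = '=' then d ++ [' ', '=', ' ']
      else if i ≠ ' ' then d ++ [i] else d)
    = (fun d i => d ++ (if i = '+' ∨ i = '-' then [' ', i]
      else if i = '=' then [' ', '=', ' ']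
      else if i ≠ ' ' then [i] else [])) := by
    funext d i; split_ifs <;> simp
  rw [hfun, PySem.List.foldl_append_eq_flatMap]
  simp only [replace_single, flatMap_flatMap, List.nil_append]
  apply List.flatMap_congr
  intro c _
  by_cases h1 : c = ' ' <;> by_cases h2 : c = '+' <;> by_cases h3 : c = '-' <;>
    by_cases h4 : c = '=' <;> simp_all [List.flatMap_cons]
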